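-- pv_equiv track=rewrite | github.com/rehvishwanath/bikeshare-tui | data/build_predictions.py | calculate_patterns
-- ===== SOURCE A (Python) =====
-- def calculate_patterns(departures, arrivals):
--     """Calculate patterns for each station."""
--     patterns = {}
--
--     # Get all unique stations
--     all_stations = set(departures.keys()) | set(arrivals.keys())
--
--     for station_id in all_stations:
--         station_pattern = {
--             "departures": {},
--             "arrivals": {},
--             "net_flow": {},  # Positive = more bikes arriving, Negative = more bikes leaving
--             "depletion_risk": {}  # Hours when station typically runs low
--         }
--
--         for day in range(7):  # 0-6 (Mon-Sun)
--             day_name = ["mon", "tue", "wed", "thu", "fri", "sat", "sun"][day]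
--             station_pattern["departures"][day_name] = {}
--             station_pattern["arrivals"][day_name] = {}
--             station_pattern["net_flow"][day_name] = {}
--
--             cumulative_flow = 0
--             min_cumulative = 0
--             min_hour = 0
--
--             for hour in range(24):
--                 dep = departures[station_id].get((day, hour), 0)
--                 arr = arrivals[station_id].get((day, hour), 0)
--                 net = arr - dep  # Positive = gaining bikes
--
--                 station_pattern["departures"][day_name][str(hour)] = dep
--                 station_pattern["arrivals"][day_name][str(hour)] = arr
--                 station_pattern["net_flow"][day_name][str(hour)] = net
--
--                 # Track cumulative flow to find when station typically depletes
--                 cumulative_flow += net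
--                 if cumulative_flow < min_cumulative:
--                     min_cumulative = cumulative_flow
--                     min_hour = hour
--
--             # Record depletion risk (hour when cumulative outflow is worst)
--             if min_cumulative < -10:  # Significant depletion
--                 station_pattern["depletion_risk"][day_name] = {
--                     "hour": min_hour,
--                     "severity": abs(min_cumulative)
--                 }
--
--         patterns[station_id] = station_pattern
--
--     return patterns
-- ===== SOURCE B (Python) =====
-- DAY_NAMES = ["mon", "tue", "wed", "thu", "fri", "sat", "sun"]
--
--
-- def calculate_patterns(departures, arrivals):
--     """Calculate patterns for each station (table-based re-implementation)."""
--     patterns = {}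
--
--     # All unique stations, first occurrence order.
--     stations = list(dict.fromkeys(list(departures) + list(arrivals)))
--
--     for station_id in stations:
--         deps = departures[station_id]
--         arrs = arrivals[station_id]
--
--         dep_tab = {}
--         arr_tab = {}
--         net_tab = {}
--         risk = {}
--
--         for day, day_name in enumerate(DAY_NAMES):
--             # Hourly tables built as comprehensions.
--             nets = [arrs.get((day, h), 0) - deps.get((day, h), 0) for h in range(24)]
--             dep_tab[day_name] = {str(h): deps.get((day, h), 0) for h in range(24)}
--             arr_tab[day_name] = {str(h): arrs.get((day, h), 0) for h in range(24)}
--             net_tab[day_name] = {str(h): nets[h] for h in range(24)}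
--
--             # Depletion: prefix-sum table, then a separate min/argmin scan.
--             prefix = [sum(nets[:h + 1]) for h in range(24)]
--             m = min(prefix)
--             if m < -10:
--                 risk[day_name] = {"hour": prefix.index(m), "severity": -m}
--
--         patterns[station_id] = {
--             "departures": dep_tab,
--             "arrivals": arr_tab,
--             "net_flow": net_tab,
--             "depletion_risk": risk,
--         }
--
--     return patterns
-- ===== Notes on version B (the rewrite author's own statement) =====
-- stated objective: alternative
-- what changed: A's single accumulating hour loop (running cumulative/min/argmin state plus in-place dict writes) is replaced by comprehension-built hourly tables and a prefix-sum table from which the depletion minimum and its first hour are found in a separate min/argmin scan.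
import Mathlib
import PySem

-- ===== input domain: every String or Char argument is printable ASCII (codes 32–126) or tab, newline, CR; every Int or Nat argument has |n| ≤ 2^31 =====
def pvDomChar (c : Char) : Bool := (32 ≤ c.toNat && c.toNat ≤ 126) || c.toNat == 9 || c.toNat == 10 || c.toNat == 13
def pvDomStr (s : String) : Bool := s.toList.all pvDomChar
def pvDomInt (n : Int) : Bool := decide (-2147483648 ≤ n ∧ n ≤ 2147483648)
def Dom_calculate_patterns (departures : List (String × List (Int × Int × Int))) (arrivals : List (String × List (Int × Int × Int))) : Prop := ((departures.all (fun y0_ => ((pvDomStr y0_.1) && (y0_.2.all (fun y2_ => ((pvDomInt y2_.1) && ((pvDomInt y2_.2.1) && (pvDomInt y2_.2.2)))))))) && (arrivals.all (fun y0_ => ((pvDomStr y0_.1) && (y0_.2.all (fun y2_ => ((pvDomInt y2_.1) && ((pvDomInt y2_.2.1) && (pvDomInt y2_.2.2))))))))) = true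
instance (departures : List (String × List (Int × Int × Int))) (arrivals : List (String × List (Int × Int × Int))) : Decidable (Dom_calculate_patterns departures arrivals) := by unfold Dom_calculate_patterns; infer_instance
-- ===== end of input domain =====

-- B replaces A's single accumulating hour loop by comprehension-built hourly tables plus a
-- prefix-sum table with a separate min/argmin scan for the depletion point (objective:
-- alternative decomposition, same asymptotic cost).

-- Shared encoding helpers (both Pythons contain the very same expressions):
-- `d.get((day, hour), 0)` over the triple encoding (day, hour, count) of dict[(day,hour)] → count.
def pvGetDH (l : List (Int × Int × Int)) (day hour : Int) : Int :=
  (PySem.Dict.mk (l.map (fun t => ((t.1, t.2.1), t.2.2)))).getD (day, hour) 0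

-- conversion of a nested Dict value to the declared output encoding (an encoding step, not logic)
def pvItems (d : PySem.Dict String (PySem.Dict String Int)) : List (String × List (String × Int)) :=
  d.items.map (fun p => (p.1, p.2.items))

abbrev pvDaySt : Type :=
  PySem.Dict String (PySem.Dict String Int) × PySem.Dict String (PySem.Dict String Int) ×
  PySem.Dict String (PySem.Dict String Int) × PySem.Dict String (PySem.Dict String Int)

def pvDayNames : List String := ["mon", "tue", "wed", "thu", "fri", "sat", "sun"]

-- ===== PORT A =====
-- one hour-loop iteration: insert dep/arr/net into the three day rows, update (cum, min_cum, min_hour)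
def pvRowStep (f : Int → Int) (d : PySem.Dict String Int) (hour : Int) : PySem.Dict String Int :=
  d.insert (PySem.Int.toStr hour) (f hour)

def pvTripleStepA (net : Int → Int) (t : Int × Int × Int) (hour : Int) : Int × Int × Int :=
  let cum := t.1 + net hour
  if cum < t.2.1 then (cum, cum, hour) else (cum, t.2.1, t.2.2)

def pvHourStepA (fd fa : Int → Int)
    (s : PySem.Dict String Int × PySem.Dict String Int × PySem.Dict String Int × Int × Int × Int)
    (hour : Int) :
    PySem.Dict String Int × PySem.Dict String Int × PySem.Dict String Int × Int × Int × Int :=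
  (pvRowStep fd s.1 hour, pvRowStep fa s.2.1 hour,
   pvRowStep (fun h => fa h - fd h) s.2.2.1 hour,
   pvTripleStepA (fun h => fa h - fd h) s.2.2.2 hour)

def pvDayStepA (deps arrs : List (Int × Int × Int)) (st : pvDaySt) (day : Int) : pvDaySt :=
  let day_name := PySem.List.pyGetD pvDayNames day ""
  let r := (PySem.List.pyRange 0 24).foldl
      (pvHourStepA (fun h => pvGetDH deps day h) (fun h => pvGetDH arrs day h))
      (PySem.Dict.empty, PySem.Dict.empty, PySem.Dict.empty, 0, 0, 0)
  (st.1.insert day_name r.1, st.2.1.insert day_name r.2.1, st.2.2.1.insert day_name r.2.2.1,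
   if r.2.2.2.2.1 < -10 then
     st.2.2.2.insert day_name
       (PySem.Dict.ofList [("hour", r.2.2.2.2.2), ("severity", |r.2.2.2.2.1|)])
   else st.2.2.2)

def pvStationA (departures arrivals : List (String × List (Int × Int × Int)))
    (patterns : PySem.Dict String (List (String × List (String × List (String × Int)))))
    (station_id : String) :
    PySem.Dict String (List (String × List (String × List (String × Int)))) :=
  -- departures[station_id] / arrivals[station_id]: KeyError (excluded by Pre_) if absent
  let deps := (PySem.Dict.mk departures).getD station_id []
  let arrs := (PySem.Dict.mk arrivals).getD station_id []
  let t := (PySem.List.pyRange 0 7).foldl (pvDayStepA deps arrs)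
      (PySem.Dict.empty, PySem.Dict.empty, PySem.Dict.empty, PySem.Dict.empty)
  patterns.insert station_id
    [("departures", pvItems t.1), ("arrivals", pvItems t.2.1),
     ("net_flow", pvItems t.2.2.1), ("depletion_risk", pvItems t.2.2.2)]

def calculate_patterns (departures : List (String × List (Int × Int × Int))) (arrivals : List (String × List (Int × Int × Int))) : List (String × List (String × List (String × List (String × Int)))) :=
  ((PySem.Set.union (PySem.Set.ofList (PySem.Dict.mk departures).keys)
      (PySem.Dict.mk arrivals).keys).foldl
    (pvStationA departures arrivals) PySem.Dict.empty).items

-- ===== PORT B =====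
-- the dict comprehension {str(h): f(h) for h in range(24)}
def pvRowB (f : Int → Int) : PySem.Dict String Int :=
  PySem.Dict.ofList ((PySem.List.pyRange 0 24).map (fun h => (PySem.Int.toStr h, f h)))

def pvDayStepB (deps arrs : List (Int × Int × Int)) (tb : pvDaySt) (p : Int × String) : pvDaySt :=
  let day := p.1
  let day_name := p.2
  let nets := (PySem.List.pyRange 0 24).map (fun h => pvGetDH arrs day h - pvGetDH deps day h)
  let pref := (PySem.List.pyRange 0 24).map
      (fun h => (PySem.List.slice nets none (some (h + 1))).sum)
  let m := (PySem.List.min? pref (fun x => x)).getD 0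
  (tb.1.insert day_name (pvRowB (fun h => pvGetDH deps day h)),
   tb.2.1.insert day_name (pvRowB (fun h => pvGetDH arrs day h)),
   tb.2.2.1.insert day_name (pvRowB (fun h => PySem.List.pyGetD nets h 0)),
   if m < -10 then
     tb.2.2.2.insert day_name
       (PySem.Dict.ofList
         [("hour", (((PySem.List.index? pref m).getD 0 : Nat) : Int)), ("severity", -m)])
   else tb.2.2.2)

def pvStationB (departures arrivals : List (String × List (Int × Int × Int)))
    (patterns : PySem.Dict String (List (String × List (String × List (String × Int)))))
    (station_id : String) :
    PySem.Dict String (List (String × List (String × List (String × Int)))) :=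
  let deps := (PySem.Dict.mk departures).getD station_id []
  let arrs := (PySem.Dict.mk arrivals).getD station_id []
  let t := (PySem.List.enumerate pvDayNames).foldl (pvDayStepB deps arrs)
      (PySem.Dict.empty, PySem.Dict.empty, PySem.Dict.empty, PySem.Dict.empty)
  patterns.insert station_id
    [("departures", pvItems t.1), ("arrivals", pvItems t.2.1),
     ("net_flow", pvItems t.2.2.1), ("depletion_risk", pvItems t.2.2.2)]

def calculate_patterns_alt (departures : List (String × List (Int × Int × Int))) (arrivals : List (String × List (Int × Int × Int))) : List (String × List (String × List (String × List (String × Int)))) :=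
  ((PySem.List.dedup ((PySem.Dict.mk departures).keys ++ (PySem.Dict.mk arrivals).keys)).foldl
    (pvStationB departures arrivals) PySem.Dict.empty).items

-- ===== PRECONDITION & SPEC =====
-- Pre_ excludes only inputs where A raises KeyError: a station id present in one dict but not
-- the other (A indexes departures[sid] and arrivals[sid] for every sid of the union).
def Pre_calculate_patterns (departures : List (String × List (Int × Int × Int))) (arrivals : List (String × List (Int × Int × Int))) : Prop :=
  (∀ k ∈ departures.map Prod.fst, k ∈ arrivals.map Prod.fst) ∧
  (∀ k ∈ arrivals.map Prod.fst, k ∈ departures.map Prod.fst)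
instance (departures : List (String × List (Int × Int × Int))) (arrivals : List (String × List (Int × Int × Int))) : Decidable (Pre_calculate_patterns departures arrivals) := by unfold Pre_calculate_patterns; infer_instance

def pvWitness_calculate_patterns : (List (String × List (Int × Int × Int))) × (List (String × List (Int × Int × Int))) :=
  ([("a", [(0, 8, 20), (0, 9, 5)])], [("a", [(0, 10, 2)])])

def Spec_calculate_patterns (departures : List (String × List (Int × Int × Int))) (arrivals : List (String × List (Int × Int × Int))) (out : List (String × List (String × List (String × List (String × Int))))) : Prop := out = calculate_patterns_alt departures arrivals
instance (departures : List (String × List (Int × Int × Int))) (arrivals : List (String × List (Int × Int × Int))) (out : List (String × List (String × List (String × List (String × Int))))) : Decidable (Spec_calculate_patterns departures arrivals out) := by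
  unfold Spec_calculate_patterns
  have d2 : DecidableEq (List (String × Int)) := List.hasDecEq
  have d4 : DecidableEq (List (String × List (String × Int))) := List.hasDecEq
  have d6 : DecidableEq (List (String × List (String × List (String × Int)))) := List.hasDecEq
  exact List.hasDecEq out (calculate_patterns_alt departures arrivals)

-- ===== CLAIM (what is proved, stated in full; the proofs are below) =====
def Claim_equal_calculate_patterns : Prop := ∀ (departures : List (String × List (Int × Int × Int))) (arrivals : List (String × List (Int × Int × Int))), Dom_calculate_patterns departures arrivals → Pre_calculate_patterns departures arrivals → Spec_calculate_patterns departures arrivals (calculate_patterns departures arrivals)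

-- ===== LEMMAS AND PROOFS =====

-- generic min-fold facts (not in the libraries in this form)
lemma pvFoldlMin_le_init (l : List Int) (a : Int) : l.foldl min a ≤ a := by
  induction l generalizing a with
  | nil => simp
  | cons x t ih => exact le_trans (ih (min a x)) (min_le_left a x)

lemma pvFoldlMin_le_mem (l : List Int) (a : Int) : ∀ x ∈ l, l.foldl min a ≤ x := by
  induction l generalizing a with
  | nil => simp
  | cons y t ih =>
    intro x hx
    rcases List.mem_cons.mp hx with h | h
    · subst h; exact le_trans (pvFoldlMin_le_init t (min a x)) (min_le_right a x)
    · exact ih (min a y) x h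

lemma pvFoldlMin_comm (l : List Int) (a b : Int) :
    l.foldl min (min a b) = min a (l.foldl min b) := by
  induction l generalizing b with
  | nil => simp
  | cons x t ih => simpa [min_assoc] using ih (min b x)

lemma pvFoldlMin_mem_or (l : List Int) (a : Int) :
    l.foldl min a ∈ l ∨ l.foldl min a = a := by
  induction l generalizing a with
  | nil => simp
  | cons x t ih =>
    rcases ih (min a x) with h | h
    · exact Or.inl (List.mem_cons_of_mem x h)
    · rcases le_total a x with hax | hxa
      · right; simpa [min_eq_left hax] using h
      · left; simp only [List.foldl_cons]; rw [h, min_eq_right hxa]; exact List.mem_cons_self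
lemma pvFoldlMin_zero_eq (l : List Int) (h : l ≠ []) :
    l.foldl min 0 = min 0 ((PySem.List.min? l (fun y => y)).getD 0) := by
  obtain ⟨x, t, rfl⟩ := List.exists_cons_of_ne_nil h
  rw [PySem.List.min?_id_cons]
  simpa using pvFoldlMin_comm t 0 x

-- characterisation of A's (cumulative, min, argmin) hour loop in terms of the prefix-sum table
def pvPS (net : Int → Int) (k : Nat) : Int := ((List.range k).map (fun i : Nat => net (i : Int))).sum
def pvPL (net : Int → Int) (k : Nat) : List Int := (List.range k).map (fun i : Nat => pvPS net (i + 1))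
def pvMinC (net : Int → Int) (k : Nat) : Int := (pvPL net k).foldl min 0
def pvMinH (net : Int → Int) (k : Nat) : Int :=
  if pvMinC net k < 0 then (((PySem.List.index? (pvPL net k) (pvMinC net k)).getD 0 : Nat) : Int)
  else 0
def pvRowN (f : Int → Int) (k : Nat) : PySem.Dict String Int :=
  PySem.Dict.ofList ((List.range k).map (fun i : Nat => (PySem.Int.toStr (i : Int), f (i : Int))))

lemma pvPS_succ (net : Int → Int) (k : Nat) : pvPS net (k + 1) = pvPS net k + net k := by
  simp [pvPS, List.range_succ]

lemma pvPL_succ (net : Int → Int) (k : Nat) :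
    pvPL net (k + 1) = pvPL net k ++ [pvPS net (k + 1)] := by
  simp [pvPL, List.range_succ]

lemma pvPL_length (net : Int → Int) (k : Nat) : (pvPL net k).length = k := by simp [pvPL]

lemma pvMinC_nonpos (net : Int → Int) (k : Nat) : pvMinC net k ≤ 0 :=
  pvFoldlMin_le_init _ 0

lemma pvMinC_le_mem (net : Int → Int) (k : Nat) {x : Int} (hx : x ∈ pvPL net k) :
    pvMinC net k ≤ x := pvFoldlMin_le_mem _ 0 x hx

lemma pvMinC_mem_of_neg (net : Int → Int) (k : Nat) (h : pvMinC net k < 0) :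
    pvMinC net k ∈ pvPL net k := by
  rcases pvFoldlMin_mem_or (pvPL net k) 0 with hm | hm
  · exact hm
  · exact absurd hm (by unfold pvMinC at h; omega)

lemma pvMinC_succ (net : Int → Int) (k : Nat) :
    pvMinC net (k + 1) = min (pvMinC net k) (pvPS net (k + 1)) := by
  simp [pvMinC, pvPL_succ, List.foldl_append]

lemma pvRowN_succ (f : Int → Int) (k : Nat) :
    pvRowN f (k + 1) = (pvRowN f k).insert (PySem.Int.toStr k) (f k) := by
  simp [pvRowN, List.range_succ, PySem.Dict.ofList, PySem.Dict.update, List.foldl_append]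

lemma pvHourfold_char (fd fa : Int → Int) (k : Nat) :
    (PySem.List.pyRange 0 (k : Int)).foldl (pvHourStepA fd fa)
      (PySem.Dict.empty, PySem.Dict.empty, PySem.Dict.empty, 0, 0, 0)
    = (pvRowN fd k, pvRowN fa k, pvRowN (fun h => fa h - fd h) k,
       pvPS (fun h => fa h - fd h) k, pvMinC (fun h => fa h - fd h) k,
       pvMinH (fun h => fa h - fd h) k) := by
  induction k with
  | zero =>
    simp [PySem.List.pyRange, pvRowN, pvPS, pvPL, pvMinC, pvMinH, PySem.Dict.ofList,
      PySem.Dict.update]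
  | succ k ih =>
    have hnet : ∀ h : Int, fa h - fd h = (fun h => fa h - fd h) h := fun _ => rfl
    generalize hN : (fun h => fa h - fd h) = net at *
    rw [show ((k + 1 : Nat) : Int) = (k : Int) + 1 by push_cast; ring,
      PySem.List.pyRange_one_succ_right (by positivity), List.foldl_append, ih]
    simp only [List.foldl_cons, List.foldl_nil]
    unfold pvHourStepA pvTripleStepA pvRowStep
    simp only [hnet]
    rw [pvRowN_succ, pvRowN_succ, pvRowN_succ]
    have hcum : pvPS net k + net k = pvPS net (k + 1) := (pvPS_succ net k).symm
    by_cases hlt : pvPS net k + net k < pvMinC net k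
    · have hminc : pvMinC net (k + 1) = pvPS net (k + 1) := by
        rw [pvMinC_succ]; omega
      have hnotmem : pvPS net (k + 1) ∉ pvPL net k := by
        intro hmem
        have := pvMinC_le_mem net k hmem
        omega
      have hidx : PySem.List.index? (pvPL net (k + 1)) (pvMinC net (k + 1)) = some k := by
        rw [pvPL_succ, hminc, PySem.List.index?_append_singleton_self _ _ hnotmem, pvPL_length]
      have hneg : pvMinC net (k + 1) < 0 := by
        have := pvMinC_nonpos net k; omega
      rw [if_pos hlt]
      refine Prod.ext rfl (Prod.ext rfl (Prod.ext rfl (Prod.ext ?_ (Prod.ext ?_ ?_)))) <;>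
        simp only
      · omega
      · omega
      · rw [pvMinH, if_pos hneg, hidx]; simp
    · have hminc : pvMinC net (k + 1) = pvMinC net k := by
        rw [pvMinC_succ]; omega
      rw [if_neg hlt]
      refine Prod.ext rfl (Prod.ext rfl (Prod.ext rfl (Prod.ext ?_ (Prod.ext ?_ ?_)))) <;>
        simp only
      · omega
      · omega
      · rw [pvMinH, pvMinH, hminc]
        by_cases hneg : pvMinC net k < 0
        · rw [if_pos hneg, if_pos hneg, pvPL_succ,
            PySem.List.index?_append_of_mem _ (pvMinC_mem_of_neg net k hneg)]
        · rw [if_neg hneg, if_neg hneg]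

-- bridge: B's comprehension-built tables equal the pvRowN/pvPL forms
lemma pvPyRange24 : PySem.List.pyRange 0 24 = (List.range 24).map Nat.cast := by
  rw [show (24 : Int) = ((24 : Nat) : Int) from rfl, PySem.List.pyRange_zero_natCast]

lemma pvRowB_eq (f : Int → Int) : pvRowB f = pvRowN f 24 := by
  rw [pvRowB, pvRowN, pvPyRange24, List.map_map]
  rfl

lemma pvPrefix_eq (net : Int → Int) :
    (PySem.List.pyRange 0 24).map
      (fun h => (PySem.List.slice ((PySem.List.pyRange 0 24).map net) none (some (h + 1))).sum)
    = pvPL net 24 := by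
  rw [pvPL]
  refine List.ext_getElem (by simp [pvPyRange24]) (fun i h1 h2 => ?_)
  have hi24 : i < 24 := by simpa [pvPyRange24] using h1
  simp only [pvPyRange24, List.getElem_map, List.getElem_range]
  rw [show ((i : Int) + 1) = ((i + 1 : Nat) : Int) by push_cast; ring,
    PySem.List.slice_to_natCast, ← List.map_take, ← List.map_take, List.take_range,
    Nat.min_eq_left (by omega : i + 1 ≤ 24)]
  simp [pvPS, List.map_map, Function.comp_def]

lemma pvNets_get (net : Int → Int) (h : Int) (h0 : 0 ≤ h) (h24 : h < 24) :
    PySem.List.pyGetD ((PySem.List.pyRange 0 24).map net) h 0 = net h :=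
  PySem.List.pyGetD_map_pyRange_of_nonneg net 24 h 0 h0 h24

-- the two per-day loop bodies agree
lemma pvDayStep_eq (deps arrs : List (Int × Int × Int)) (st : pvDaySt) (day : Int) :
    pvDayStepA deps arrs st day
      = pvDayStepB deps arrs st (day, PySem.List.pyGetD pvDayNames day "") := by
  simp only [pvDayStepA, pvDayStepB]
  have hchar := pvHourfold_char (fun h => pvGetDH deps day h) (fun h => pvGetDH arrs day h) 24
  simp only [Nat.cast_ofNat] at hchar
  rw [hchar]
  dsimp only
  set net := fun h => pvGetDH arrs day h - pvGetDH deps day h with hnetdef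
  have hrowN :
      pvRowB (fun h => PySem.List.pyGetD ((PySem.List.pyRange 0 24).map net) h 0)
        = pvRowN net 24 := by
    rw [← pvRowB_eq]
    unfold pvRowB
    refine congrArg _ (List.map_congr_left (fun h hh => ?_))
    have hb := (PySem.List.mem_pyRange_one.mp hh)
    simp only [pvNets_get net h hb.1 hb.2]
  rw [hrowN, pvRowB_eq, pvRowB_eq, pvPrefix_eq]
  have hm := pvFoldlMin_zero_eq (pvPL net 24) (by simp [pvPL])
  set m := (PySem.List.min? (pvPL net 24) fun x => x).getD 0 with hmdef
  have hmc : pvMinC net 24 = min 0 m := hm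
  by_cases h10 : m < -10
  · rw [if_pos (by omega), if_pos h10]
    have hmeq : pvMinC net 24 = m := by omega
    rw [pvMinH, if_pos (by omega), hmeq, abs_of_neg (by omega : m < 0)]
  · rw [if_neg (by omega), if_neg h10]

-- day-loop alignment: enumerate(DAY_NAMES) is range(7) paired with its names
lemma pvEnumerate_eq :
    PySem.List.enumerate pvDayNames
      = (PySem.List.pyRange 0 7).map (fun d => (d, PySem.List.pyGetD pvDayNames d "")) := by
  decide

lemma pvStation_eq (departures arrivals : List (String × List (Int × Int × Int))) :
    pvStationA departures arrivals = pvStationB departures arrivals := by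
  funext patterns station_id
  simp only [pvStationA, pvStationB, pvEnumerate_eq, List.foldl_map]
  have : (fun (tb : pvDaySt) (d : Int) =>
      pvDayStepB ((PySem.Dict.mk departures).getD station_id [])
        ((PySem.Dict.mk arrivals).getD station_id []) tb
        (d, PySem.List.pyGetD pvDayNames d ""))
      = pvDayStepA ((PySem.Dict.mk departures).getD station_id [])
        ((PySem.Dict.mk arrivals).getD station_id []) := by
    funext tb d
    exact (pvDayStep_eq _ _ tb d).symm
  rw [this]

lemma pvStations_eq (a b : List String) :
    PySem.Set.union (PySem.Set.ofList a) b = PySem.List.dedup (a ++ b) := by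
  rw [PySem.List.dedup_eq_ofList, PySem.Set.ofList_append]
  rfl

-- ===== VERDICT (by name: the statement is the Claim_ definition above) =====
theorem calculate_patterns_spec : Claim_equal_calculate_patterns := by
  intro departures arrivals _ _
  unfold Spec_calculate_patterns calculate_patterns calculate_patterns_alt
  rw [pvStations_eq, pvStation_eq]
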